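-- pv_equiv track=rewrite | github.com/Rafael-Miceli/AlgorithStudy | Python/Rounders/problem.py | rounders
-- ===== SOURCE A (Python) =====
-- def rounders(value):
--
--     zeros = 1
--     while value > 10:
--         if value % 10 == 0:
--             value = int(value / 10)
--             continue
--         if value % 10 >= 5:
--             value = int(value / 10)
--             value += 1
--             zeros *= 10
--             continue
--
--         value = int(value / 10)
--         zeros *= 10
--
--     return value * zeros
-- ===== SOURCE B (Python) =====
-- def rounders(value):
--     if value <= 10:
--         return value
--     d = value % 10
--     r = int(value / 10)
--     if d == 0:
--         return rounders(r)
--     if d >= 5: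
--         return rounders(r + 1) * 10
--     return rounders(r) * 10
-- ===== Notes on version B (the rewrite author's own statement) =====
-- stated objective: simpler
-- what changed: Replaced the while-loop that threads a `zeros` multiplier accumulator with a direct recursion over the decimal digits that multiplies by 10 on the way back up (the trailing-zero branch contributes no factor).
import Mathlib
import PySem

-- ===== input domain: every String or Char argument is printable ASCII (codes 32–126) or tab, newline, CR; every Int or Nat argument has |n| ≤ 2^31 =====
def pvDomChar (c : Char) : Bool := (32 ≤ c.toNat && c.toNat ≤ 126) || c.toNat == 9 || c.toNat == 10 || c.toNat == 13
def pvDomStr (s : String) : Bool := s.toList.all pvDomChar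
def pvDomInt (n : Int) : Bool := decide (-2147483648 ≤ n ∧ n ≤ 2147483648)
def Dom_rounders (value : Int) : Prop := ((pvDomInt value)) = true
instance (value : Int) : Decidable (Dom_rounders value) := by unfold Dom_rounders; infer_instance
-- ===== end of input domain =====

-- B is a direct recursion over the decimal digits that multiplies by 10 on the way
-- back up, eliminating A's threaded `zeros` accumulator (objective: simpler).

-- ===== PORT A =====
-- while-loop of A as structural recursion over (value, zeros); int(value/10) is
-- truncation toward zero = Int.tdiv (exact here since |value| ≤ 2^31 keeps floats exact)
def roundersLoop (value zeros : Int) : Int :=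
  if 10 < value then
    if value % 10 = 0 then roundersLoop (value.tdiv 10) zeros
    else if 5 ≤ value % 10 then roundersLoop (value.tdiv 10 + 1) (zeros * 10)
    else roundersLoop (value.tdiv 10) (zeros * 10)
  else value * zeros
termination_by value.toNat
decreasing_by all_goals (simp only [Int.tdiv_eq_ediv_of_nonneg (by omega : (0:Int) ≤ value)]; omega)

def rounders (value : Int) : Int := roundersLoop value 1

-- ===== PORT B =====
def rounders_alt (value : Int) : Int :=
  if value ≤ 10 then value
  else
    let d := value % 10
    let r := value.tdiv 10
    if d = 0 then rounders_alt r
    else if 5 ≤ d then rounders_alt (r + 1) * 10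
    else rounders_alt r * 10
termination_by value.toNat
decreasing_by all_goals (simp only [Int.tdiv_eq_ediv_of_nonneg (by omega : (0:Int) ≤ value)]; omega)

-- ===== PRECONDITION & SPEC =====
def Spec_rounders (value : Int) (out : Int) : Prop := out = rounders_alt value
instance (value : Int) (out : Int) : Decidable (Spec_rounders value out) := by unfold Spec_rounders; infer_instance

-- ===== CLAIM (what is proved, stated in full; the proofs are below) =====
def Claim_equal_rounders : Prop := ∀ (value : Int), Dom_rounders value → Spec_rounders value (rounders value)

-- ===== LEMMAS AND PROOFS =====
theorem roundersLoop_eq (value zeros : Int) :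
    roundersLoop value zeros = rounders_alt value * zeros := by
  induction value, zeros using roundersLoop.induct with
  | case1 v z h h0 ih =>
      rw [roundersLoop, rounders_alt]
      simp only [if_pos h, if_neg (by omega : ¬ v ≤ 10), if_pos h0, ih]
  | case2 v z h h0 h5 ih =>
      rw [roundersLoop, rounders_alt]
      simp only [if_pos h, if_neg (by omega : ¬ v ≤ 10), if_neg h0, if_pos h5, ih]
      ring
  | case3 v z h h0 h5 ih =>
      rw [roundersLoop, rounders_alt]
      simp only [if_pos h, if_neg (by omega : ¬ v ≤ 10), if_neg h0, if_neg h5, ih]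
      ring
  | case4 v z h =>
      rw [roundersLoop, rounders_alt]
      simp only [if_neg h, if_pos (by omega : v ≤ 10)]

-- ===== VERDICT (by name: the statement is the Claim_ definition above) =====
theorem rounders_spec : Claim_equal_rounders := by
  intro value _
  unfold Spec_rounders rounders
  rw [roundersLoop_eq, mul_one]
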